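-- pv_equiv track=rewrite | github.com/xrose3159/agentic_VLMdata_with_graph | step3_generate.py | _relation_semantic_bucket
-- ===== SOURCE A (Python) =====
-- _TAIL_TYPE_ENUM = {"TIME", "QUANTITY", "LOCATION", "PERSON", "ORG", "OTHER"}
--
-- def _normalize_tail_type(value) -> str:
--     if not isinstance(value, str):
--         return "OTHER"
--     normalized = value.strip().upper()
--     return normalized if normalized in _TAIL_TYPE_ENUM else "OTHER"
--
-- def _relation_semantic_bucket(relation_key: str, target_type: str) -> str:
--     rel = relation_key or ""
--     target_type = _normalize_tail_type(target_type)
--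
--     if target_type == "PERSON":
--         if any(k in rel for k in ("founder", "founded_by", "ceo", "president", "chairman", "leader", "owner")):
--             return "person_role"
--         if any(k in rel for k in ("author", "writer", "lyrics", "composer", "music_by", "director", "designed_by", "created_by")):
--             return "person_creator"
--         if any(k in rel for k in ("born_in", "born_on", "died_in", "died_on", "spouse", "parent")):
--             return "person_biographical"
--         return "person_other"
--
--     if target_type == "ORG":
--         if any(k in rel for k in ("parent", "owned_by", "subsidiary", "division", "group", "brand_of")):
--             return "org_ownership"
--         if any(k in rel for k in ("sponsored_by", "regulated_by", "partner", "publisher", "distributor", "label")):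
--             return "org_affiliation"
--         if any(k in rel for k in ("listed_on", "member_of", "league", "association")):
--             return "org_membership"
--         return "org_other"
--
--     if target_type == "LOCATION":
--         if any(k in rel for k in ("headquartered", "located_in", "based_in", "born_in", "from", "resides_in", "origin", "country", "city", "state")):
--             return "location_membership"
--         if any(k in rel for k in ("performed_at", "premiered_at", "staged_at", "held_at", "filmed_in", "shot_in", "opened_at")):
--             return "location_occurrence"
--         if any(k in rel for k in ("formed_by_intersection", "intersection", "crosses", "runs_through", "borders", "connects")):
--             return "location_structure"
--         return "location_other"
--
--     return "other"
-- ===== SOURCE B (Python) =====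
-- # B: instead of staged any()-group checks with early returns, a single accumulator
-- # pass over a flat keyword->rank table computes the MINIMUM matching rank; the
-- # label is then picked by index.  No early return; the scan is order-independent.
-- _TABLE = {
--     "PERSON": (
--         ["person_role", "person_creator", "person_biographical", "person_other"],
--         [("founder", 0), ("founded_by", 0), ("ceo", 0), ("president", 0), ("chairman", 0), ("leader", 0), ("owner", 0),
--          ("author", 1), ("writer", 1), ("lyrics", 1), ("composer", 1), ("music_by", 1), ("director", 1), ("designed_by", 1), ("created_by", 1),
--          ("born_in", 2), ("born_on", 2), ("died_in", 2), ("died_on", 2), ("spouse", 2), ("parent", 2)],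
--     ),
--     "ORG": (
--         ["org_ownership", "org_affiliation", "org_membership", "org_other"],
--         [("parent", 0), ("owned_by", 0), ("subsidiary", 0), ("division", 0), ("group", 0), ("brand_of", 0),
--          ("sponsored_by", 1), ("regulated_by", 1), ("partner", 1), ("publisher", 1), ("distributor", 1), ("label", 1),
--          ("listed_on", 2), ("member_of", 2), ("league", 2), ("association", 2)],
--     ),
--     "LOCATION": (
--         ["location_membership", "location_occurrence", "location_structure", "location_other"],
--         [("headquartered", 0), ("located_in", 0), ("based_in", 0), ("born_in", 0), ("from", 0), ("resides_in", 0), ("origin", 0), ("country", 0), ("city", 0), ("state", 0),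
--          ("performed_at", 1), ("premiered_at", 1), ("staged_at", 1), ("held_at", 1), ("filmed_in", 1), ("shot_in", 1), ("opened_at", 1),
--          ("formed_by_intersection", 2), ("intersection", 2), ("crosses", 2), ("runs_through", 2), ("borders", 2), ("connects", 2)],
--     ),
-- }
--
--
-- def _normalize_tail_type(value) -> str:
--     if not isinstance(value, str):
--         return "OTHER"
--     normalized = value.strip().upper()
--     return normalized if normalized in ("TIME", "QUANTITY", "LOCATION", "PERSON", "ORG", "OTHER") else "OTHER"
--
--
-- def _relation_semantic_bucket(relation_key: str, target_type: str) -> str: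
--     rel = relation_key or ""
--     entry = _TABLE.get(_normalize_tail_type(target_type))
--     if entry is None:
--         return "other"
--     labels, keyword_ranks = entry
--     best = len(labels) - 1          # rank of the fallback label
--     for kw, rank in keyword_ranks:
--         if rank < best and kw in rel:
--             best = rank
--     return labels[best]             # best is always in range
-- ===== Notes on version B (the rewrite author's own statement) =====
-- stated objective: alternative
-- what changed: Replaces the staged any()-group checks with early returns by a single accumulator pass over a flat keyword-to-rank table that computes the minimum matching rank (order-independent, no early return), then selects the label by that index.
import Mathlib
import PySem

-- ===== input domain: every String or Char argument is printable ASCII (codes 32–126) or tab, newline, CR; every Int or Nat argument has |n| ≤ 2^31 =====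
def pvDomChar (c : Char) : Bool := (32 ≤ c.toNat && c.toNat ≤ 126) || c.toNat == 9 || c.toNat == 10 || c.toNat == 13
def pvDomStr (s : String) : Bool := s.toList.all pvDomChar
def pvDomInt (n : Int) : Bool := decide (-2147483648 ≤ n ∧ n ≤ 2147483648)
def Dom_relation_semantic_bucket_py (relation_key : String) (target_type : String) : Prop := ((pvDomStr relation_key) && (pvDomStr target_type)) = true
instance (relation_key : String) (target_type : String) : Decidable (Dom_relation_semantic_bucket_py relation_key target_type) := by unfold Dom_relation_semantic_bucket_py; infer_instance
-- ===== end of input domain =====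

-- B replaces A's staged any()-group checks (early returns) with a single min-rank accumulator
-- pass over a flat keyword->rank table, selecting the label by the minimum matching rank (alternative; same cost).


-- ===== PORT A =====
-- _normalize_tail_type: membership in the set _TAIL_TYPE_ENUM
def normalize_tail_type (value : String) : String :=
  let normalized := PySem.Str.upper (PySem.Str.strip value)
  if (PySem.Set.ofList ["TIME", "QUANTITY", "LOCATION", "PERSON", "ORG", "OTHER"]).contains normalized
  then normalized else "OTHER"

def relation_semantic_bucket_py (relation_key : String) (target_type : String) : String :=
  let rel := if relation_key = "" then "" else relation_key   -- `relation_key or ""`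
  let tt := normalize_tail_type target_type
  if tt = "PERSON" then
    if ["founder", "founded_by", "ceo", "president", "chairman", "leader", "owner"].any
        (fun k => PySem.Str.isIn k rel) then "person_role"
    else if ["author", "writer", "lyrics", "composer", "music_by", "director", "designed_by", "created_by"].any
        (fun k => PySem.Str.isIn k rel) then "person_creator"
    else if ["born_in", "born_on", "died_in", "died_on", "spouse", "parent"].any
        (fun k => PySem.Str.isIn k rel) then "person_biographical"
    else "person_other"
  else if tt = "ORG" then
    if ["parent", "owned_by", "subsidiary", "division", "group", "brand_of"].any
        (fun k => PySem.Str.isIn k rel) then "org_ownership"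
    else if ["sponsored_by", "regulated_by", "partner", "publisher", "distributor", "label"].any
        (fun k => PySem.Str.isIn k rel) then "org_affiliation"
    else if ["listed_on", "member_of", "league", "association"].any
        (fun k => PySem.Str.isIn k rel) then "org_membership"
    else "org_other"
  else if tt = "LOCATION" then
    if ["headquartered", "located_in", "based_in", "born_in", "from", "resides_in", "origin", "country", "city", "state"].any
        (fun k => PySem.Str.isIn k rel) then "location_membership"
    else if ["performed_at", "premiered_at", "staged_at", "held_at", "filmed_in", "shot_in", "opened_at"].any
        (fun k => PySem.Str.isIn k rel) then "location_occurrence"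
    else if ["formed_by_intersection", "intersection", "crosses", "runs_through", "borders", "connects"].any
        (fun k => PySem.Str.isIn k rel) then "location_structure"
    else "location_other"
  else "other"

-- ===== PORT B =====
-- _TABLE: type → (labels indexed by rank, flat keyword→rank list); ranks are small nonneg ints, so Nat is exact
def bucketTable : List (String × (List String × List (String × Nat))) :=
  [ ("PERSON",
      (["person_role", "person_creator", "person_biographical", "person_other"],
       [("founder", 0), ("founded_by", 0), ("ceo", 0), ("president", 0), ("chairman", 0), ("leader", 0), ("owner", 0),
        ("author", 1), ("writer", 1), ("lyrics", 1), ("composer", 1), ("music_by", 1), ("director", 1), ("designed_by", 1), ("created_by", 1),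
        ("born_in", 2), ("born_on", 2), ("died_in", 2), ("died_on", 2), ("spouse", 2), ("parent", 2)])),
    ("ORG",
      (["org_ownership", "org_affiliation", "org_membership", "org_other"],
       [("parent", 0), ("owned_by", 0), ("subsidiary", 0), ("division", 0), ("group", 0), ("brand_of", 0),
        ("sponsored_by", 1), ("regulated_by", 1), ("partner", 1), ("publisher", 1), ("distributor", 1), ("label", 1),
        ("listed_on", 2), ("member_of", 2), ("league", 2), ("association", 2)])),
    ("LOCATION",
      (["location_membership", "location_occurrence", "location_structure", "location_other"],
       [("headquartered", 0), ("located_in", 0), ("based_in", 0), ("born_in", 0), ("from", 0), ("resides_in", 0), ("origin", 0), ("country", 0), ("city", 0), ("state", 0),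
        ("performed_at", 1), ("premiered_at", 1), ("staged_at", 1), ("held_at", 1), ("filmed_in", 1), ("shot_in", 1), ("opened_at", 1),
        ("formed_by_intersection", 2), ("intersection", 2), ("crosses", 2), ("runs_through", 2), ("borders", 2), ("connects", 2)])) ]

-- B's _normalize_tail_type: membership in a tuple literal
def normalize_tail_type_b (value : String) : String :=
  let normalized := PySem.Str.upper (PySem.Str.strip value)
  if normalized ∈ ["TIME", "QUANTITY", "LOCATION", "PERSON", "ORG", "OTHER"] then normalized else "OTHER"

-- loop body: `if rank < best and kw in rel: best = rank`
def bucketStep (rel : String) (best : Nat) (p : String × Nat) : Nat :=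
  if p.2 < best ∧ PySem.Str.isIn p.1 rel then p.2 else best

def relation_semantic_bucket_py_alt (relation_key : String) (target_type : String) : String :=
  let rel := if relation_key = "" then "" else relation_key   -- `relation_key or ""`
  match (PySem.Dict.ofList bucketTable).get? (normalize_tail_type_b target_type) with
  | none => "other"
  | some (labels, keyword_ranks) =>
      let best := keyword_ranks.foldl (bucketStep rel) (labels.length - 1)
      labels.getD best ""   -- labels[best]; best < labels.length always, so getD is exact

-- ===== PRECONDITION & SPEC =====
def Spec_relation_semantic_bucket_py (relation_key : String) (target_type : String) (out : String) : Prop := out = relation_semantic_bucket_py_alt relation_key target_type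
instance (relation_key : String) (target_type : String) (out : String) : Decidable (Spec_relation_semantic_bucket_py relation_key target_type out) := by unfold Spec_relation_semantic_bucket_py; infer_instance

-- ===== CLAIM (what is proved, stated in full; the proofs are below) =====
def Claim_equal_relation_semantic_bucket_py : Prop := ∀ (relation_key : String) (target_type : String), Dom_relation_semantic_bucket_py relation_key target_type → Spec_relation_semantic_bucket_py relation_key target_type (relation_semantic_bucket_py relation_key target_type)

-- ===== LEMMAS AND PROOFS =====

theorem normalize_b_eq (v : String) : normalize_tail_type_b v = normalize_tail_type v := by
  simp only [normalize_tail_type, normalize_tail_type_b,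
    show PySem.Set.ofList ["TIME", "QUANTITY", "LOCATION", "PERSON", "ORG", "OTHER"]
        = (["TIME", "QUANTITY", "LOCATION", "PERSON", "ORG", "OTHER"] : List String) from rfl,
    PySem.Set.contains_iff]

theorem normalize_mem (v : String) :
    normalize_tail_type v ∈ ["TIME", "QUANTITY", "LOCATION", "PERSON", "ORG", "OTHER"] := by
  simp only [normalize_tail_type]
  split_ifs with h
  · simpa [PySem.Set.ofList] using h
  · simp

-- folding a constant-rank segment either lowers the accumulator to r (if some keyword matches) or keeps it
theorem fold_const_rank (rel : String) (ks : List String) (r b : Nat) :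
    (ks.map (fun k => (k, r))).foldl (bucketStep rel) b =
      if r < b ∧ ks.any (fun k => PySem.Str.isIn k rel) then r else b := by
  induction ks generalizing b with
  | nil => simp
  | cons k ks ih =>
    rw [List.map_cons, List.foldl_cons]
    by_cases hk : PySem.Str.isIn k rel = true
    · by_cases hr : r < b
      · rw [show bucketStep rel b (k, r) = r from if_pos ⟨hr, hk⟩, ih,
          if_neg (fun h => Nat.lt_irrefl r h.1),
          if_pos ⟨hr, by simp only [List.any_cons, hk, Bool.true_or]⟩]
      · rw [show bucketStep rel b (k, r) = b from if_neg (fun h => hr h.1), ih,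
          if_neg (fun h => hr h.1), if_neg (fun h => hr h.1)]
    · have hk' : PySem.Str.isIn k rel = false := by simpa using hk
      rw [show bucketStep rel b (k, r) = b from if_neg (fun h => hk h.2), ih]
      simp only [List.any_cons, hk', Bool.false_or]

theorem bucket_main : ∀ (relation_key : String) (target_type : String),
    relation_semantic_bucket_py relation_key target_type = relation_semantic_bucket_py_alt relation_key target_type := by
  intro relation_key target_type
  unfold relation_semantic_bucket_py relation_semantic_bucket_py_alt
  rw [← normalize_b_eq]
  have h := normalize_mem target_type
  rw [← normalize_b_eq] at h
  set n := normalize_tail_type_b target_type with hn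
  clear_value n
  set rel := if relation_key = "" then "" else relation_key with hrel
  clear_value rel
  simp only [List.mem_cons, List.not_mem_nil, or_false] at h
  rcases h with h|h|h|h|h|h <;> subst h
  · rfl
  · rfl
  · -- LOCATION
    rw [show (PySem.Dict.ofList bucketTable).get? "LOCATION" = some
      (["location_membership", "location_occurrence", "location_structure", "location_other"],
       (["headquartered", "located_in", "based_in", "born_in", "from", "resides_in", "origin", "country", "city", "state"].map (fun k => (k, 0)))
       ++ (["performed_at", "premiered_at", "staged_at", "held_at", "filmed_in", "shot_in", "opened_at"].map (fun k => (k, 1)))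
       ++ (["formed_by_intersection", "intersection", "crosses", "runs_through", "borders", "connects"].map (fun k => (k, 2)))) from rfl]
    rw [if_neg (by decide), if_neg (by decide), if_pos rfl]
    simp only [List.foldl_append, fold_const_rank]
    split_ifs <;> simp_all
  · -- PERSON
    rw [show (PySem.Dict.ofList bucketTable).get? "PERSON" = some
      (["person_role", "person_creator", "person_biographical", "person_other"],
       (["founder", "founded_by", "ceo", "president", "chairman", "leader", "owner"].map (fun k => (k, 0)))
       ++ (["author", "writer", "lyrics", "composer", "music_by", "director", "designed_by", "created_by"].map (fun k => (k, 1)))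
       ++ (["born_in", "born_on", "died_in", "died_on", "spouse", "parent"].map (fun k => (k, 2)))) from rfl]
    rw [if_pos rfl]
    simp only [List.foldl_append, fold_const_rank]
    split_ifs <;> simp_all
  · -- ORG
    rw [show (PySem.Dict.ofList bucketTable).get? "ORG" = some
      (["org_ownership", "org_affiliation", "org_membership", "org_other"],
       (["parent", "owned_by", "subsidiary", "division", "group", "brand_of"].map (fun k => (k, 0)))
       ++ (["sponsored_by", "regulated_by", "partner", "publisher", "distributor", "label"].map (fun k => (k, 1)))
       ++ (["listed_on", "member_of", "league", "association"].map (fun k => (k, 2)))) from rfl]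
    rw [if_neg (by decide), if_pos rfl]
    simp only [List.foldl_append, fold_const_rank]
    split_ifs <;> simp_all
  · rfl

-- ===== VERDICT (by name: the statement is the Claim_ definition above) =====
theorem relation_semantic_bucket_py_spec : Claim_equal_relation_semantic_bucket_py := by
  intro relation_key target_type _
  exact bucket_main relation_key target_type
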